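-- pv_equiv track=rewrite | github.com/jk53542/HASHIRU_Bench | bench/hashiru_gradio_agent.py | _gradio_history_to_tuples
-- ===== SOURCE A (Python) =====
-- from typing import Any, List, Optional
--
-- def _gradio_history_to_tuples(history: List[dict]) -> List[tuple]:
--     """Convert list of {role, content} to Gradio legacy tuple format [(user, bot), ...]."""
--     pairs = []
--     i = 0
--     while i < len(history):
--         msg = history[i]
--         role = msg.get("role", "")
--         content = msg.get("content") or ""
--         if role == "user":
--             bot_content = ""
--             if i + 1 < len(history) and history[i + 1].get("role") == "assistant":
--                 bot_content = history[i + 1].get("content") or ""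
--                 i += 1
--             pairs.append((content, bot_content))
--         elif role == "assistant":
--             if pairs:
--                 pairs[-1] = (pairs[-1][0], content)
--             else:
--                 pairs.append(("", content))
--         i += 1
--     return pairs
-- ===== SOURCE B (Python) =====
-- from typing import List
--
--
-- def _pairs(msgs: List[tuple]) -> List[tuple]:
--     """Group a normalized (role, content) list: each head message plus its trailing
--     run of assistant messages becomes one tuple; the bot slot is the content of the
--     last assistant of that run."""
--     out = []
--     i = 0
--     n = len(msgs)
--     while i < n:
--         role, content = msgs[i]
--         j = i + 1
--         while j < n and msgs[j][0] == "assistant":  # scan the trailing assistant run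
--             j += 1
--         run = msgs[i + 1:j]
--         if role == "user":
--             out.append((content, run[-1][1] if run else ""))
--         else:  # role == "assistant"
--             out.append(("", run[-1][1] if run else content))
--         i = j
--     return out
--
--
-- def _gradio_history_to_tuples(history: List[dict]) -> List[tuple]:
--     """Two stages: normalize/filter the messages, then group each message with its
--     trailing assistant run into one (user, bot) tuple."""
--     msgs = [(m.get("role", ""), m.get("content") or "")
--             for m in history
--             if m.get("role", "") in ("user", "assistant")]
--     return _pairs(msgs)
-- ===== Notes on version B (the rewrite author's own statement) =====
-- stated objective: alternative
-- what changed: Replaced A's single stateful while loop (index lookahead-consume plus in-place overwrite of the last pair) by two stages: a normalize/filter pass over the messages, then a recursion that groups each message together with its trailing run of assistant messages into one (user, bot) tuple built front-to-back with no mutation.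
import Mathlib
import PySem

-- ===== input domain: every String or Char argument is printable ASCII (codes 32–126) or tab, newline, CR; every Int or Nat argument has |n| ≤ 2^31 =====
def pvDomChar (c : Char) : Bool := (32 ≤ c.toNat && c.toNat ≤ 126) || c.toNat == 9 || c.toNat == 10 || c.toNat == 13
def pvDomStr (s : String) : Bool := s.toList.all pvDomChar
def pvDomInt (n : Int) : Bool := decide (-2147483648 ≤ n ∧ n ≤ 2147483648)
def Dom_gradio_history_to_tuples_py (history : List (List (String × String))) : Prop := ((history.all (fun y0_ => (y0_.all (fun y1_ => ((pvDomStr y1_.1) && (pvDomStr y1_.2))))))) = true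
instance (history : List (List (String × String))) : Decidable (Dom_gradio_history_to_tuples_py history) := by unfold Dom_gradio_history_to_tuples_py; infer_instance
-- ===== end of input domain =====

-- B replaces A's single index-driven while loop (lookahead-consume + overwrite of the last
-- pair) by two stages: a normalize/filter pass, then a recursion that groups each message
-- with its trailing run of assistant messages into one tuple (alternative decomposition).

-- ===== PORT A =====
-- while-loop of A as accumulator recursion; the i+=1 / lookahead-consume steps are the two recursive calls.
-- msg.get(k) on the assoc-list dict is List.lookup k msg (first match); .get("role","") / "or ''" is .getD "".
def gradioLoopA : List (String × String) → List (List (String × String)) → List (String × String)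
  | pairs, [] => pairs
  | pairs, msg :: rest =>
    let role := (List.lookup "role" msg).getD ""          -- msg.get("role", "")
    let content := (List.lookup "content" msg).getD ""    -- msg.get("content") or ""
    if role == "user" then
      match rest with
      | nxt :: rest' =>
        if List.lookup "role" nxt == some "assistant" then
          gradioLoopA (pairs ++ [(content, (List.lookup "content" nxt).getD "")]) rest'
        else
          gradioLoopA (pairs ++ [(content, "")]) (nxt :: rest')
      | [] => gradioLoopA (pairs ++ [(content, "")]) []
    else if role == "assistant" then
      match pairs.getLast? with
      | some p => gradioLoopA (pairs.dropLast ++ [(p.1, content)]) rest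
      | none => gradioLoopA [("", content)] rest
    else
      gradioLoopA pairs rest

def gradio_history_to_tuples_py (history : List (List (String × String))) : List (String × String) :=
  gradioLoopA [] history

-- ===== PORT B =====
-- stage 1: the list comprehension of Source B (filter to the two known roles, normalize to (role, content))
def gradioNormB (msg : List (String × String)) : Option (String × String) :=
  let role := (List.lookup "role" msg).getD ""
  let content := (List.lookup "content" msg).getD ""
  if role == "user" || role == "assistant" then some (role, content) else none

-- stage 2: Source B's _pairs — strip the head message's trailing assistant run (the while loop,
-- = takeWhile/dropWhile of the 'assistant' predicate) and emit one tuple, then recurse.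
def gradioPairsB : List (String × String) → List (String × String)
  | [] => []
  | (role, content) :: rest =>
    let run := rest.takeWhile (fun p => p.1 == "assistant")
    let rest' := rest.dropWhile (fun p => p.1 == "assistant")
    if role == "user" then
      (content, (match run.getLast? with | some p => p.2 | none => "")) :: gradioPairsB rest'
    else
      ("", (match run.getLast? with | some p => p.2 | none => content)) :: gradioPairsB rest'
  termination_by msgs => msgs.length
  decreasing_by
    all_goals
      simp only [List.length_cons]
      exact Nat.lt_succ_of_le (List.length_dropWhile_le _ rest)

def gradio_history_to_tuples_py_alt (history : List (List (String × String))) : List (String × String) :=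
  gradioPairsB (history.filterMap gradioNormB)

-- ===== PRECONDITION & SPEC =====
def Spec_gradio_history_to_tuples_py (history : List (List (String × String))) (out : List (String × String)) : Prop := out = gradio_history_to_tuples_py_alt history
instance (history : List (List (String × String))) (out : List (String × String)) : Decidable (Spec_gradio_history_to_tuples_py history out) := by unfold Spec_gradio_history_to_tuples_py; infer_instance

-- ===== CLAIM (what is proved, stated in full; the proofs are below) =====
def Claim_equal_gradio_history_to_tuples_py : Prop := ∀ (history : List (List (String × String))), Dom_gradio_history_to_tuples_py history → Spec_gradio_history_to_tuples_py history (gradio_history_to_tuples_py history)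

-- ===== LEMMAS AND PROOFS =====

-- proof-only intermediate: A's loop body on a normalized (role, content) message
def gradioStepN (pairs : List (String × String)) (m : String × String) : List (String × String) :=
  if m.1 == "user" then pairs ++ [(m.2, "")]
  else match pairs.getLast? with
       | some p => pairs.dropLast ++ [(p.1, m.2)]
       | none => [("", m.2)]

theorem gradioStepN_ne_nil (pairs : List (String × String)) (m : String × String) :
    gradioStepN pairs m ≠ [] := by
  unfold gradioStepN
  split
  · simp
  · split <;> simp

-- A's loop equals folding gradioStepN over the normalized message list
theorem gradioLoopA_eq_foldN (pairs : List (String × String)) (rest : List (List (String × String))) :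
    gradioLoopA pairs rest = (rest.filterMap gradioNormB).foldl gradioStepN pairs := by
  induction pairs, rest using gradioLoopA.induct with
  | case1 pairs => rfl
  | case2 pairs msg role content hu nxt rest' ha ih =>
    -- user followed by an assistant message: one loop step equals two fold steps
    simp only [beq_iff_eq] at hu ha
    have hu' : (List.lookup "role" msg).getD "" = "user" := hu
    have hn : (List.lookup "role" nxt).getD "" = "assistant" := by rw [ha]; rfl
    have hc : content = (List.lookup "content" msg).getD "" := rfl
    rw [hc] at ih
    simp [gradioLoopA, gradioNormB, gradioStepN, hu', ha, ih]
  | case3 pairs msg role content hu nxt rest' ha ih =>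
    simp only [beq_iff_eq] at hu ha
    have hu' : (List.lookup "role" msg).getD "" = "user" := hu
    have hc : content = (List.lookup "content" msg).getD "" := rfl
    rw [hc] at ih
    have hn : ¬ (List.lookup "role" nxt).getD "" = "assistant" := by
      intro h
      cases hl : List.lookup "role" nxt with
      | none => rw [hl] at h; exact absurd h.symm (by decide)
      | some v => rw [hl] at h; simp at h; exact ha (by rw [hl, h])
    simp [gradioLoopA, gradioNormB, gradioStepN, hu', ha, ih]
  | case4 pairs msg role content hu ih =>
    simp only [beq_iff_eq] at hu
    have hu' : (List.lookup "role" msg).getD "" = "user" := hu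
    simp [gradioLoopA, gradioNormB, gradioStepN, hu']
  | case5 pairs msg rest role content hu ha p hl ih =>
    simp only [beq_iff_eq] at hu ha
    have hu' : ¬ (List.lookup "role" msg).getD "" = "user" := hu
    have ha' : (List.lookup "role" msg).getD "" = "assistant" := ha
    have hc : content = (List.lookup "content" msg).getD "" := rfl
    rw [hc] at ih
    cases rest with
    | nil => simp [gradioLoopA, gradioNormB, gradioStepN, ha', hl]
    | cons a as => simp [gradioLoopA, gradioNormB, gradioStepN, ha', hl, ih]
  | case6 pairs msg rest role content hu ha hl ih =>
    simp only [beq_iff_eq] at hu ha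
    have hu' : ¬ (List.lookup "role" msg).getD "" = "user" := hu
    have ha' : (List.lookup "role" msg).getD "" = "assistant" := ha
    have hc : content = (List.lookup "content" msg).getD "" := rfl
    rw [hc] at ih
    cases rest with
    | nil => simp [gradioLoopA, gradioNormB, gradioStepN, ha', hl]
    | cons a as => simp [gradioLoopA, gradioNormB, gradioStepN, ha', hl, ih]
  | case7 pairs msg rest role hu ha ih =>
    simp only [beq_iff_eq] at hu ha
    have hu' : ¬ (List.lookup "role" msg).getD "" = "user" := hu
    have ha' : ¬ (List.lookup "role" msg).getD "" = "assistant" := ha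
    cases rest with
    | nil => simp [gradioLoopA, gradioNormB, hu', ha']
    | cons a as => simp [gradioLoopA, gradioNormB, hu', ha', ih]

-- everything gradioNormB keeps has role "user" or "assistant"
theorem mem_filterMap_norm (history : List (List (String × String)))
    (m : String × String) (hm : m ∈ history.filterMap gradioNormB) :
    m.1 = "user" ∨ m.1 = "assistant" := by
  rcases List.mem_filterMap.1 hm with ⟨msg, _, hmsg⟩
  unfold gradioNormB at hmsg
  by_cases h1 : (List.lookup "role" msg).getD "" = "user"
  · simp [h1] at hmsg
    exact Or.inl (by rw [← hmsg])
  · by_cases h2 : (List.lookup "role" msg).getD "" = "assistant"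
    · simp [h2] at hmsg
      exact Or.inr (by rw [← hmsg])
    · simp [h1, h2] at hmsg

-- the fold keeps a nonempty prefix of the accumulator untouched
theorem foldN_append (msgs : List (String × String)) (P Q : List (String × String)) (hQ : Q ≠ []) :
    msgs.foldl gradioStepN (P ++ Q) = P ++ msgs.foldl gradioStepN Q := by
  induction msgs generalizing Q with
  | nil => rfl
  | cons m rest ih =>
    have hstep : gradioStepN (P ++ Q) m = P ++ gradioStepN Q m := by
      unfold gradioStepN
      split
      · simp
      · rw [List.getLast?_append_of_ne_nil P hQ, List.dropLast_append_of_ne_nil hQ]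
        cases hg : Q.getLast? with
        | some p => simp
        | none => exact absurd (List.getLast?_eq_none_iff.1 hg) hQ
    simp only [List.foldl_cons, hstep]
    exact ih _ (gradioStepN_ne_nil Q m)

-- folding a run of assistants from P ++ [c] overwrites c's bot slot with the run's last content
theorem foldN_run (R : List (String × String)) (hR : ∀ m ∈ R, m.1 = "assistant")
    (P : List (String × String)) (c : String × String) :
    R.foldl gradioStepN (P ++ [c]) =
      P ++ [(c.1, (match R.getLast? with | some p => p.2 | none => c.2))] := by
  induction R generalizing c with
  | nil => simp
  | cons m rest ih =>
    have hm : m.1 = "assistant" := hR m (by simp)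
    have hstep : gradioStepN (P ++ [c]) m = P ++ [(c.1, m.2)] := by
      unfold gradioStepN
      rw [hm]
      simp
    rw [List.foldl_cons, hstep, ih (fun x hx => hR x (by simp [hx]))]
    cases hg : rest.getLast? with
    | some p => simp [List.getLast?_cons, hg]
    | none => simp [List.getLast?_cons, hg]

-- if msgs is empty or starts with a user message, the fold just extends the accumulator
theorem foldN_user_head (msgs : List (String × String)) (P : List (String × String))
    (h : msgs = [] ∨ ∃ c rest, msgs = ("user", c) :: rest) :
    msgs.foldl gradioStepN P = P ++ msgs.foldl gradioStepN [] := by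
  rcases h with h | ⟨c, rest, h⟩
  · simp [h]
  · subst h
    have h1 : gradioStepN P ("user", c) = P ++ [(c, "")] := by
      unfold gradioStepN; simp
    have h2 : gradioStepN [] ("user", c) = [(c, "")] := by
      unfold gradioStepN; simp
    rw [List.foldl_cons, List.foldl_cons, h1, h2]
    exact foldN_append rest P [(c, "")] (by simp)

-- head of dropWhile fails the predicate; elements are user-or-assistant, so the head is a user
theorem dropWhile_head_user (msgs : List (String × String))
    (hroles : ∀ m ∈ msgs, m.1 = "user" ∨ m.1 = "assistant") :
    msgs.dropWhile (fun p => p.1 == "assistant") = [] ∨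
      ∃ c rest, msgs.dropWhile (fun p => p.1 == "assistant") = ("user", c) :: rest := by
  cases hd : msgs.dropWhile (fun p => p.1 == "assistant") with
  | nil => exact Or.inl rfl
  | cons x rest =>
    right
    have hx : ¬ (x.1 == "assistant") = true := by
      have := List.head?_dropWhile_not (fun p : String × String => p.1 == "assistant") msgs
      rw [hd] at this
      simpa using this
    have hmem : x ∈ msgs := (List.dropWhile_sublist _).subset (by rw [hd]; simp)
    rcases hroles x hmem with h | h
    · exact ⟨x.2, rest, congrArg (fun y => y :: rest) (Prod.ext h rfl)⟩
    · exact absurd (beq_iff_eq.2 h) hx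

-- one grouping step: peel the head message and its assistant run off the fold
theorem foldN_pairsB_step (role content : String) (rest : List (String × String))
    (hroles : ∀ m ∈ (role, content) :: rest, m.1 = "user" ∨ m.1 = "assistant")
    (ih : (∀ m ∈ rest.dropWhile (fun p => p.1 == "assistant"), m.1 = "user" ∨ m.1 = "assistant") →
      (rest.dropWhile (fun p => p.1 == "assistant")).foldl gradioStepN [] =
        gradioPairsB (rest.dropWhile (fun p => p.1 == "assistant"))) :
    (((role, content) :: rest).foldl gradioStepN []) = gradioPairsB ((role, content) :: rest) := by
  have hsplit : rest = rest.takeWhile (fun p => p.1 == "assistant")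
      ++ rest.dropWhile (fun p => p.1 == "assistant") :=
    (List.takeWhile_append_dropWhile).symm
  have hrun : ∀ m ∈ rest.takeWhile (fun p => p.1 == "assistant"), m.1 = "assistant" := by
    intro m hm
    exact beq_iff_eq.1 (List.mem_takeWhile_imp (p := fun p : String × String => p.1 == "assistant") hm)
  have hrest' : ∀ m ∈ rest.dropWhile (fun p => p.1 == "assistant"),
      m.1 = "user" ∨ m.1 = "assistant" := by
    intro m hm
    exact hroles m (List.mem_cons_of_mem _ ((List.dropWhile_sublist _).subset hm))
  have hhead := dropWhile_head_user rest (fun m hm => hroles m (List.mem_cons_of_mem _ hm))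
  rcases hroles (role, content) List.mem_cons_self with hu | ha
  · simp only at hu
    subst hu
    have h1 : gradioStepN [] ("user", content) = [(content, "")] := by
      unfold gradioStepN; simp
    rw [List.foldl_cons, h1, show rest.foldl gradioStepN [(content, "")]
        = (rest.takeWhile (fun p => p.1 == "assistant")
            ++ rest.dropWhile (fun p => p.1 == "assistant")).foldl gradioStepN [(content, "")]
      from by rw [← hsplit], List.foldl_append,
      show [(content, "")] = [] ++ [(content, "")] from rfl,
      foldN_run _ hrun [] (content, ""), List.nil_append,
      foldN_user_head _ _ hhead, ih hrest']
    simp [gradioPairsB]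
  · simp only at ha
    subst ha
    have h1 : gradioStepN [] ("assistant", content) = [("", content)] := by
      unfold gradioStepN; simp
    rw [List.foldl_cons, h1, show rest.foldl gradioStepN [("", content)]
        = (rest.takeWhile (fun p => p.1 == "assistant")
            ++ rest.dropWhile (fun p => p.1 == "assistant")).foldl gradioStepN [("", content)]
      from by rw [← hsplit], List.foldl_append,
      show [("", content)] = [] ++ [("", content)] from rfl,
      foldN_run _ hrun [] ("", content), List.nil_append,
      foldN_user_head _ _ hhead, ih hrest']
    simp [gradioPairsB]

-- main lemma: the fold of the normalized list is B's run-grouping recursion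
theorem foldN_eq_pairsB (msgs : List (String × String))
    (hroles : ∀ m ∈ msgs, m.1 = "user" ∨ m.1 = "assistant") :
    msgs.foldl gradioStepN [] = gradioPairsB msgs := by
  induction msgs using gradioPairsB.induct with
  | case1 => simp [gradioPairsB]
  | case2 role content rest rest' h ih =>
    exact foldN_pairsB_step role content rest hroles ih
  | case3 role content rest rest' h ih =>
    exact foldN_pairsB_step role content rest hroles ih

-- ===== VERDICT (by name: the statement is the Claim_ definition above) =====
theorem gradio_history_to_tuples_py_spec : Claim_equal_gradio_history_to_tuples_py := by
  intro history _
  show gradio_history_to_tuples_py history = gradio_history_to_tuples_py_alt history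
  rw [gradio_history_to_tuples_py, gradioLoopA_eq_foldN,
    foldN_eq_pairsB _ (mem_filterMap_norm history)]
  rfl
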